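-- pv_equiv track=rewrite | github.com/Fantasy1905/API-Number-Classification | main.py | get_fun_fact
-- ===== SOURCE A (Python) =====
-- def is_prime(n):
--     """Check if integer n is a prime"""
--     if n < 2:
--         return False
--     if n == 2:
--         return True
--     if n % 2 == 0:
--         return False
--     for i in range(3, int(n ** 0.5) + 1, 2):
--         if n % i == 0:
--             return False
--     return True
--
-- def is_perfect(n):
--     """Check if integer n is a perfect number"""
--     if n < 2:
--         return False
--     total = 1
--     for i in range(2, n):
--         if n % i == 0:
--             total += i
--             if total > n:
--                 return False
--         if total == n:
--             return True
--     return False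
--
-- def is_armstrong(n):
--     """Check if integer n is an Armstrong number"""
--     digits = [int(d) for d in str(n)]
--     return n==sum(d ** len(digits) for d in digits)
--
-- def get_fun_fact(n):
--     """Get fun fact about integer n"""
--     if is_prime(n):
--         return f"{n} is a prime number because it has only two division: 1 and itself."
--     if is_perfect(n):
--         return f"{n} is a prime number because the sum of its proper diisors equals the number."
--     if is_armstrong(n):
--         return f"{n} is an Armstrong number because {'+'.join([f'{d}^{len(str(n))}' for d in str(n)])} = {n}."
--     else:
--         return f"{n} is just an interesting number!"
-- ===== SOURCE B (Python) =====
-- def get_fun_fact(n):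
--     """Get fun fact about integer n"""
--     # One pass over i = 1..isqrt(n): collect the full divisor sum (pairing i
--     # with n // i) and remember whether any divisor in [2, isqrt(n)] exists.
--     total = 0
--     small = False
--     i = 1
--     while i * i <= n:
--         if n % i == 0:
--             total += i
--             if i > 1:
--                 small = True
--             j = n // i
--             if j != i:
--                 total += j
--         i += 1
--     if n >= 2 and not small:
--         return f"{n} is a prime number because it has only two division: 1 and itself."
--     if n >= 2 and total == 2 * n:
--         return f"{n} is a prime number because the sum of its proper diisors equals the number."
--     s = str(n)
--     k = len(s)
--     if n == sum(int(c) ** k for c in s):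
--         return f"{n} is an Armstrong number because {'+'.join(f'{c}^{k}' for c in s)} = {n}."
--     return f"{n} is just an interesting number!"
-- ===== Notes on version B (the rewrite author's own statement) =====
-- stated objective: faster
-- what changed: Replaces A's separate scans (odd trial division for primality plus an O(n) proper-divisor prefix loop for perfection) by a single divisor-pairing pass up to isqrt(n) that yields both the primality flag and the full divisor sum, then compares the sum with 2n.
-- intended difference: On the rare composites (24, 2016, 8190, ...) whose ascending proper divisors have a proper prefix summing to exactly n although n is not perfect, A's early 'total == n' test wrongly reports a perfect number and returns the perfect-number string; B returns the Armstrong/interesting classification, which is intended since such n are not perfect. — e.g. on get_fun_fact(24): A returns "24 is a prime number because the sum of its proper diisors equals the number.", B returns "24 is just an interesting number!"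
import Mathlib
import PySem

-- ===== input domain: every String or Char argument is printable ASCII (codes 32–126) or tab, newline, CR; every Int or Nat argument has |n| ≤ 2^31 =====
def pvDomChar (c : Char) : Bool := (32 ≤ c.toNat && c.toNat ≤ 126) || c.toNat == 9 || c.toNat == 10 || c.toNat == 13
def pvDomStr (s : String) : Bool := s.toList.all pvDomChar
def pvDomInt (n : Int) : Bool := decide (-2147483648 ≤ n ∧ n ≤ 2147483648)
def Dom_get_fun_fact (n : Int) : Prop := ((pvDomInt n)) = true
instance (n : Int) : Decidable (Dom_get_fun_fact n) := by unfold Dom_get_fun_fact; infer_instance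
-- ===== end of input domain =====

-- B replaces A's separate scans (odd trial division for primality, O(n) proper-divisor prefix
-- loop for perfection) by one divisor-pairing pass up to the integer square root that yields
-- both the primality flag and the full divisor sum; on the rare inputs where A's prefix test
-- misfires (D_ below) B returns the intended classification.


-- ===== PORT A =====
-- `int(n ** 0.5)` ported by hand as the integer square root (the number of k in [0, n] with
-- k*k ≤ n, minus one); exact for 0 ≤ n ≤ 2^31, where the float power rounds to isqrt(n).
def isqrtA (n : Int) : Int :=
  PySem.List.len ((PySem.List.pyRange 0 (n + 1) 1).filter (fun k => decide (k * k ≤ n))) - 1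

def isPrimeA (n : Int) : Bool :=
  if n < 2 then false
  else if n == 2 then true
  else if PySem.Int.mod n 2 == 0 then false
  else (PySem.List.pyRange 3 (isqrtA n + 1) 2).all (fun i => !(PySem.Int.mod n i == 0))

-- the `for i in range(2, n)` loop of is_perfect, with its two early returns
def perfLoopA (n : Int) : List Int → Int → Bool
  | [], _ => false
  | i :: rest, total =>
    if PySem.Int.mod n i == 0 then
      if n < total + i then false
      else if total + i == n then true
      else perfLoopA n rest (total + i)
    else if total == n then true
    else perfLoopA n rest total

def isPerfectA (n : Int) : Bool :=
  if n < 2 then false else perfLoopA n (PySem.List.pyRange 2 n 1) 1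

-- int(d) on a single character of str(n); Python raises on '-' (n < 0, excluded by Pre_)
def digitsA (n : Int) : List Int :=
  (PySem.Int.toChars n).map (fun c => (PySem.Int.ofChars? [c]).getD 0)

def isArmstrongA (n : Int) : Bool :=
  let digits := digitsA n
  n == (digits.map (fun d => d ^ digits.length)).sum

def get_fun_fact (n : Int) : String :=
  if isPrimeA n then
    PySem.Int.toStr n ++ " is a prime number because it has only two division: 1 and itself."
  else if isPerfectA n then
    PySem.Int.toStr n ++ " is a prime number because the sum of its proper diisors equals the number."
  else if isArmstrongA n then
    PySem.Int.toStr n ++ " is an Armstrong number because " ++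
      PySem.Str.join "+" ((PySem.Int.toStr n).toList.map
        (fun c => String.ofList [c] ++ "^" ++ PySem.Int.toStr (PySem.Str.len (PySem.Int.toStr n)))) ++
      " = " ++ PySem.Int.toStr n ++ "."
  else PySem.Int.toStr n ++ " is just an interesting number!"

-- ===== PORT B =====
-- Source B's `while i * i <= n` loop: pairs each divisor i ≤ isqrt(n) with n // i to collect the
-- full divisor sum, and flags in `small` any divisor in [2, isqrt(n)]. The fuel argument only
-- makes the while loop structurally total: n.toNat + 1 steps always suffice.
def altLoopF (n : Int) : Nat → Int → Int → Bool → Int × Bool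
  | 0, _, total, small => (total, small)
  | fuel + 1, i, total, small =>
    if i * i ≤ n then
      if PySem.Int.mod n i == 0 then
        let j := PySem.Int.floordiv n i
        altLoopF n fuel (i + 1) (if j == i then total + i else total + i + j) (small || decide (1 < i))
      else altLoopF n fuel (i + 1) total small
    else (total, small)

def get_fun_fact_alt (n : Int) : String :=
  let r := altLoopF n (n.toNat + 1) 1 0 false
  if decide (2 ≤ n) && !r.2 then
    PySem.Int.toStr n ++ " is a prime number because it has only two division: 1 and itself."
  else if decide (2 ≤ n) && (r.1 == 2 * n) then
    PySem.Int.toStr n ++ " is a prime number because the sum of its proper diisors equals the number."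
  else
    let s := PySem.Int.toStr n
    let k := PySem.Str.len s
    -- int(c) ** k: k = len(str(n)) ≥ 0, so Python's ** is the monoid power ^ k.toNat
    if n == (s.toList.map (fun c => ((PySem.Int.ofChars? [c]).getD 0) ^ k.toNat)).sum then
      s ++ " is an Armstrong number because " ++
        PySem.Str.join "+" (s.toList.map (fun c => String.ofList [c] ++ "^" ++ PySem.Int.toStr k)) ++
        " = " ++ s ++ "."
    else s ++ " is just an interesting number!"

-- ===== PRECONDITION & SPEC =====
-- Pre_ excludes exactly the n < 0, on which A raises ValueError (is_armstrong calls int('-')).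
def Pre_get_fun_fact (n : Int) : Prop := 0 ≤ n
instance (n : Int) : Decidable (Pre_get_fun_fact n) := by unfold Pre_get_fun_fact; infer_instance
def pvWitness_get_fun_fact : Int := 7

-- all divisors of m, found in O(sqrt m) by pairing each small divisor x with m / x
def dvList (m : Nat) : List Nat :=
  ((((List.range m.sqrt).map (· + 1)).filter (· ∣ m)).flatMap (fun x => [x, m / x])).dedup

-- On the rare composites (24, 2016, 8190, …) whose ascending proper divisors have a proper
-- prefix summing to exactly n although n is not perfect, A's early `total == n` test wrongly
-- reports a perfect number and returns the perfect-number string; B returns the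
-- Armstrong/interesting classification, which is intended since such n are not perfect.
def D_get_fun_fact (n : Int) : Prop :=
  (∃ K ∈ dvList n.toNat, K < n.toNat ∧ ((dvList n.toNat).filter (· ≤ K)).sum = n.toNat) ∧
    (dvList n.toNat).sum ≠ 2 * n.toNat
instance (n : Int) : Decidable (D_get_fun_fact n) := by unfold D_get_fun_fact; infer_instance

def Spec_get_fun_fact (n : Int) (out : String) : Prop := ¬ D_get_fun_fact n → out = get_fun_fact_alt n
instance (n : Int) (out : String) : Decidable (Spec_get_fun_fact n out) := by unfold Spec_get_fun_fact; infer_instance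

def pvDiffWitness_get_fun_fact : Int := 24
def pvDiffWitnessOut_get_fun_fact : String × String :=
  ("24 is a prime number because the sum of its proper diisors equals the number.",
   "24 is just an interesting number!")

-- ===== CLAIM (what is proved, stated in full; the proofs are below) =====
def Claim_unchanged_get_fun_fact : Prop := ∀ (n : Int), Dom_get_fun_fact n → Pre_get_fun_fact n → Spec_get_fun_fact n (get_fun_fact n)
def Claim_changed_get_fun_fact : Prop := Dom_get_fun_fact (pvDiffWitness_get_fun_fact) ∧ Pre_get_fun_fact (pvDiffWitness_get_fun_fact) ∧ D_get_fun_fact (pvDiffWitness_get_fun_fact) ∧ get_fun_fact (pvDiffWitness_get_fun_fact) = pvDiffWitnessOut_get_fun_fact.1 ∧ get_fun_fact_alt (pvDiffWitness_get_fun_fact) = pvDiffWitnessOut_get_fun_fact.2 ∧ pvDiffWitnessOut_get_fun_fact.1 ≠ pvDiffWitnessOut_get_fun_fact.2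
def Claim_exact_get_fun_fact : Prop := ∀ (n : Int), Dom_get_fun_fact n → Pre_get_fun_fact n → D_get_fun_fact n → get_fun_fact n ≠ get_fun_fact_alt n

-- ===== LEMMAS AND PROOFS =====

-- the integer square root of n as an Int (proof-side abbreviation)
def isq (n : Int) : Int := (Nat.sqrt n.toNat : Int)

-- sum of the divisors of n lying in [a, b] (proof-side, over Int)
def dsum (n a b : Int) : Int :=
  ((PySem.List.pyRange a (b + 1) 1).map (fun i => if i ∣ n then i else 0)).sum

-- the paired divisor sum B's loop accumulates over [a, b]
def psum (n a b : Int) : Int :=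
  ((PySem.List.pyRange a (b + 1) 1).map
    (fun j => if j ∣ n then (if n / j = j then j else j + n / j) else 0)).sum

-- "some divisor of n lies in [a, b]"
def anyDiv (n a b : Int) : Bool := (PySem.List.pyRange a (b + 1) 1).any (fun j => decide (j ∣ n))

lemma isq_nonneg (n : Int) : 0 ≤ isq n := by unfold isq; positivity

lemma isq_bounds (n : Int) (hn : 0 ≤ n) :
    isq n * isq n ≤ n ∧ n < (isq n + 1) * (isq n + 1) := by
  have h1 := Nat.sqrt_le' n.toNat
  have h2 := Nat.lt_succ_sqrt' n.toNat
  unfold isq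
  constructor
  · have : ((Nat.sqrt n.toNat ^ 2 : ℕ) : ℤ) ≤ (n.toNat : ℤ) := by exact_mod_cast h1
    push_cast at this
    rw [Int.toNat_of_nonneg hn] at this
    nlinarith
  · have : ((n.toNat : ℕ) : ℤ) < ((Nat.sqrt n.toNat).succ ^ 2 : ℕ) := by exact_mod_cast h2
    push_cast at this
    rw [Int.toNat_of_nonneg hn] at this
    nlinarith

lemma le_isq_iff (n i : Int) (hn : 0 ≤ n) (hi : 0 ≤ i) : i * i ≤ n ↔ i ≤ isq n := by
  obtain ⟨h1, h2⟩ := isq_bounds n hn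
  have h0 := isq_nonneg n
  constructor
  · intro h
    by_contra hgt
    push_neg at hgt
    nlinarith
  · intro h
    nlinarith

lemma isqrtA_eq (n : Int) (hn : 0 ≤ n) : isqrtA n = isq n := by
  have h0 := isq_nonneg n
  have hsn : isq n ≤ n := by
    obtain ⟨h1, _⟩ := isq_bounds n hn
    nlinarith
  unfold isqrtA
  rw [PySem.List.pyRange_one_append 0 (isq n + 1) (n + 1) (by omega) (by omega)]
  rw [List.filter_append]
  have hfa : (PySem.List.pyRange 0 (isq n + 1) 1).filter (fun k => decide (k * k ≤ n))
      = PySem.List.pyRange 0 (isq n + 1) 1 := by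
    apply List.filter_eq_self.mpr
    intro k hk
    rw [PySem.List.mem_pyRange_one] at hk
    simp only [decide_eq_true_eq]
    exact (le_isq_iff n k hn hk.1).mpr (by omega)
  have hfb : (PySem.List.pyRange (isq n + 1) (n + 1) 1).filter (fun k => decide (k * k ≤ n))
      = [] := by
    apply List.filter_eq_nil_iff.mpr
    intro k hk
    rw [PySem.List.mem_pyRange_one] at hk
    simp only [decide_eq_true_eq]
    intro hle
    have := (le_isq_iff n k hn (by omega)).mp hle
    omega
  rw [hfa, hfb, List.append_nil, PySem.List.len_eq, PySem.List.length_pyRange_one]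
  omega

-- basic recurrences for dsum
lemma dsum_nil (n a b : Int) (h : b < a) : dsum n a b = 0 := by
  unfold dsum
  rw [PySem.List.pyRange_one_eq_nil (by omega)]
  rfl

lemma dsum_cons (n a b : Int) (h : a ≤ b) : dsum n a b = (if a ∣ n then a else 0) + dsum n (a + 1) b := by
  unfold dsum
  rw [PySem.List.pyRange_one_cons (by omega)]
  simp [List.map_cons, List.sum_cons]

lemma dsum_top (n a b : Int) (h : a ≤ b) : dsum n a b = dsum n a (b - 1) + (if b ∣ n then b else 0) := by
  unfold dsum
  have : b + 1 = (b - 1 + 1) + 1 := by ring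
  rw [this, PySem.List.pyRange_one_succ_right (by omega)]
  simp [List.map_append, List.sum_append]

lemma dsum_nonneg (n a b : Int) (ha : 0 ≤ a) : 0 ≤ dsum n a b := by
  unfold dsum
  apply List.sum_nonneg
  intro x hx
  obtain ⟨i, hi, rfl⟩ := List.mem_map.mp hx
  rw [PySem.List.mem_pyRange_one] at hi
  split <;> omega

-- bridge to Finset sums (for the pairing argument)
lemma dsum_eq_finset (n a b : Int) : dsum n a b = ∑ i ∈ Finset.Icc a b, if i ∣ n then i else 0 := by
  rcases le_or_gt a b with h | h
  · obtain ⟨k, hk⟩ : ∃ k : ℕ, b = a + k := ⟨(b - a).toNat, by omega⟩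
    subst hk
    induction k generalizing a with
    | zero =>
      simp only [Nat.cast_zero, add_zero]
      rw [dsum_cons n a a le_rfl, dsum_nil n (a + 1) a (by omega), Finset.Icc_self,
        Finset.sum_singleton]
      ring
    | succ m ih =>
      rw [dsum_cons n a (a + (m + 1 : ℕ)) (by push_cast; omega)]
      have := ih (a + 1) (by push_cast; omega)
      rw [show a + 1 + (m : ℕ) = a + ((m + 1 : ℕ) : ℤ) by push_cast; ring] at this
      rw [this,
        ← Finset.insert_Icc_add_one_left_eq_Icc (a := a) (b := a + ((m + 1 : ℕ) : ℤ))
          (by push_cast; omega),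
        Finset.sum_insert (by simp)]
  · rw [dsum_nil n a b h, Finset.Icc_eq_empty (by omega), Finset.sum_empty]

lemma psum_eq_finset (n a b : Int) :
    psum n a b = ∑ j ∈ Finset.Icc a b, (if j ∣ n then (if n / j = j then j else j + n / j) else 0) := by
  rcases le_or_gt a b with h | h
  · obtain ⟨k, hk⟩ : ∃ k : ℕ, b = a + k := ⟨(b - a).toNat, by omega⟩
    subst hk
    induction k generalizing a with
    | zero =>
      unfold psum
      simp only [Nat.cast_zero, add_zero]
      rw [PySem.List.pyRange_one_cons (by omega), PySem.List.pyRange_one_eq_nil (by omega),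
        Finset.Icc_self, Finset.sum_singleton]
      simp
    | succ m ih =>
      unfold psum
      rw [PySem.List.pyRange_one_cons (by push_cast; omega)]
      have := ih (a + 1) (by push_cast; omega)
      unfold psum at this
      rw [show a + 1 + (m : ℕ) = a + ((m + 1 : ℕ) : ℤ) by push_cast; ring] at this
      simp only [List.map_cons, List.sum_cons]
      rw [this,
        ← Finset.insert_Icc_add_one_left_eq_Icc (a := a) (b := a + ((m + 1 : ℕ) : ℤ))
          (by push_cast; omega),
        Finset.sum_insert (by simp)]
  · unfold psum
    rw [PySem.List.pyRange_one_eq_nil (by omega), Finset.Icc_eq_empty (by omega), Finset.sum_empty]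
    rfl

lemma anyDiv_iff (n a b : Int) : anyDiv n a b = true ↔ ∃ j, a ≤ j ∧ j ≤ b ∧ j ∣ n := by
  unfold anyDiv
  rw [List.any_eq_true]
  constructor
  · rintro ⟨j, hj, hdvd⟩
    rw [PySem.List.mem_pyRange_one] at hj
    exact ⟨j, hj.1, by omega, by simpa using hdvd⟩
  · rintro ⟨j, h1, h2, h3⟩
    exact ⟨j, PySem.List.mem_pyRange_one.mpr ⟨h1, by omega⟩, by simpa using h3⟩


lemma psum_empty (n a b : Int) (h : b < a) : psum n a b = 0 := by
  unfold psum
  rw [PySem.List.pyRange_one_eq_nil (by omega)]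
  rfl

lemma psum_cons (n a b : Int) (h : a ≤ b) :
    psum n a b = (if a ∣ n then (if n / a = a then a else a + n / a) else 0) + psum n (a + 1) b := by
  unfold psum
  rw [PySem.List.pyRange_one_cons (by omega)]
  simp [List.map_cons, List.sum_cons]

lemma anyDiv_empty (n a b : Int) (h : b < a) : anyDiv n a b = false := by
  unfold anyDiv
  rw [PySem.List.pyRange_one_eq_nil (by omega)]
  rfl

lemma anyDiv_cons (n a b : Int) (h : a ≤ b) :
    anyDiv n a b = (decide (a ∣ n) || anyDiv n (a + 1) b) := by
  unfold anyDiv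
  rw [PySem.List.pyRange_one_cons (by omega)]
  simp

lemma dsum_pos_div (n a b : Int) (_ha : 0 ≤ a) (h : 0 < dsum n a b) :
    ∃ j, a ≤ j ∧ j ≤ b ∧ j ∣ n := by
  by_contra hno
  push_neg at hno
  have : dsum n a b = 0 := by
    rw [dsum_eq_finset]
    apply Finset.sum_eq_zero
    intro i hi
    rw [Finset.mem_Icc] at hi
    rw [if_neg (hno i hi.1 hi.2)]
  omega

-- characterization of B's while loop
lemma altLoop_spec (n : Int) (hn : 0 ≤ n) :
    ∀ fuel i t s, 1 ≤ i → (isq n + 1 - i).toNat < fuel →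
      altLoopF n fuel i t s = (t + psum n i (isq n), s || anyDiv n (max i 2) (isq n)) := by
  intro fuel
  induction fuel with
  | zero => intro i t s _ h; omega
  | succ fuel ih =>
    intro i t s hi hfuel
    by_cases hcond : i * i ≤ n
    · have hile : i ≤ isq n := (le_isq_iff n i hn (by omega)).mp hcond
      have hrec : (isq n + 1 - (i + 1)).toNat < fuel := by omega
      by_cases hd : i ∣ n
      · have hmod : (PySem.Int.mod n i == 0) = true := by
          simp [PySem.Int.mod_eq_zero_iff_dvd, hd]
        have hfd : PySem.Int.floordiv n i = n / i :=
          PySem.Int.floordiv_eq_ediv_of_pos (by omega)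
        simp only [altLoopF, if_pos hcond, hmod, if_pos]
        rw [ih (i + 1) _ _ (by omega) hrec, hfd, Prod.mk.injEq]
        constructor
        · rw [psum_cons n i (isq n) hile, if_pos hd]
          by_cases hji : n / i = i
          · simp only [hji, BEq.rfl, if_pos]
            ring
          · have hbe : ((n / i : Int) == i) = false := by simp [hji]
            rw [hbe, if_neg hji]
            simp only [Bool.false_eq_true, if_false]
            ring
        · rcases eq_or_lt_of_le hi with h1 | h1
          · subst h1
            rw [show max ((1:ℤ) + 1) 2 = 2 by norm_num, show max (1:ℤ) 2 = 2 by norm_num]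
            simp
          · have h2i : 2 ≤ i := by omega
            rw [show max i 2 = i by omega, show max (i + 1) 2 = i + 1 by omega,
              anyDiv_cons n i (isq n) hile]
            simp [hd, show 1 < i by omega]
      · have hmod : (PySem.Int.mod n i == 0) = false := by
          simp [PySem.Int.mod_eq_zero_iff_dvd, hd]
        simp only [altLoopF, if_pos hcond, hmod]
        simp only [Bool.false_eq_true, if_false]
        rw [ih (i + 1) _ _ (by omega) hrec, Prod.mk.injEq]
        constructor
        · rw [psum_cons n i (isq n) hile, if_neg hd]
          ring
        · rcases eq_or_lt_of_le hi with h1 | h1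
          · subst h1
            rw [show max ((1:ℤ) + 1) 2 = 2 by norm_num, show max (1:ℤ) 2 = 2 by norm_num]
          · have h2i : 2 ≤ i := by omega
            rw [show max i 2 = i by omega, show max (i + 1) 2 = i + 1 by omega,
              anyDiv_cons n i (isq n) hile]
            simp [hd]
    · have hgt : isq n < i := by
        by_contra hle
        push_neg at hle
        exact hcond ((le_isq_iff n i hn (by omega)).mpr hle)
      simp only [altLoopF, if_neg hcond]
      rw [psum_empty n i (isq n) (by omega), anyDiv_empty n (max i 2) (isq n) (by omega)]
      simp

-- divisor pairing: the paired sum over [1, isqrt n] is the full divisor sum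
lemma pairing (n : Int) (hn : 1 ≤ n) : psum n 1 (isq n) = dsum n 1 n := by
  have h0 := isq_nonneg n
  obtain ⟨hb1, hb2⟩ := isq_bounds n (by omega)
  have hr1 : 1 ≤ isq n := (le_isq_iff n 1 (by omega) (by omega)).mp (by omega)
  have hrn : isq n ≤ n := by nlinarith
  rw [psum_eq_finset, dsum_eq_finset]
  have hsplit : Finset.Icc (1 : ℤ) n = Finset.Icc 1 (isq n) ∪ Finset.Icc (isq n + 1) n := by
    ext x
    simp only [Finset.mem_union, Finset.mem_Icc]
    omega
  have hdisj : Disjoint (Finset.Icc (1 : ℤ) (isq n)) (Finset.Icc (isq n + 1) n) := by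
    rw [Finset.disjoint_left]
    intro x hx hx'
    rw [Finset.mem_Icc] at hx hx'
    omega
  rw [hsplit, Finset.sum_union hdisj]
  have hpt : ∀ j ∈ Finset.Icc (1 : ℤ) (isq n),
      (if j ∣ n then (if n / j = j then j else j + n / j) else 0)
        = (if j ∣ n then j else 0) + (if j ∣ n ∧ n / j ≠ j then n / j else 0) := by
    intro j _
    by_cases hd : j ∣ n
    · by_cases hq : n / j = j
      · simp [hd, hq]
      · simp [hd, hq]
    · simp [hd]
  rw [Finset.sum_congr rfl hpt, Finset.sum_add_distrib]
  congr 1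
  rw [← Finset.sum_filter, ← Finset.sum_filter]
  apply Finset.sum_nbij' (i := fun j => n / j) (j := fun j => n / j)
  · -- forward membership
    intro j hj
    simp only [Finset.mem_filter, Finset.mem_Icc] at hj ⊢
    obtain ⟨⟨hj1, hj2⟩, hjd, hjne⟩ := hj
    obtain ⟨c, hc⟩ := hjd
    have hcd : n / j = c := by
      rw [hc, Int.mul_ediv_cancel_left _ (by omega)]
    rw [hcd] at hjne ⊢
    have hc1 : 1 ≤ c := by nlinarith
    have hcn : c ≤ n := by nlinarith
    have hcr : isq n + 1 ≤ c := by
      by_contra hlt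
      push_neg at hlt
      have hcr' : c ≤ isq n := by omega
      rcases lt_or_gt_of_ne hjne with hx | hx
      · -- c < j : c ≤ isq n - 1
        have h1 : j * c ≤ isq n * (isq n - 1) :=
          mul_le_mul hj2 (by omega) (by omega) (by omega)
        nlinarith
      · -- j < c : j ≤ isq n - 1
        have h1 : j * c ≤ (isq n - 1) * (isq n) :=
          mul_le_mul (by omega) hcr' (by omega) (by omega)
        nlinarith
    exact ⟨⟨hcr, hcn⟩, ⟨j, by rw [hc]; ring⟩⟩
  · -- backward membership
    intro j hj
    simp only [Finset.mem_filter, Finset.mem_Icc] at hj ⊢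
    obtain ⟨⟨hj1, hj2⟩, hjd⟩ := hj
    obtain ⟨c, hc⟩ := hjd
    have hcd : n / j = c := by rw [hc, Int.mul_ediv_cancel_left _ (by omega)]
    have hc1 : 1 ≤ c := by nlinarith
    have hcr : c ≤ isq n := by
      by_contra hlt
      push_neg at hlt
      have h1 : (isq n + 1) * (isq n + 1) ≤ j * c :=
        mul_le_mul (by omega) (by omega) (by omega) (by omega)
      nlinarith
    have hncc : n / c = j := by rw [hc, mul_comm, Int.mul_ediv_cancel_left _ (by omega)]
    rw [hcd]
    exact ⟨⟨hc1, hcr⟩, ⟨j, by rw [hc]; ring⟩, by rw [hncc]; omega⟩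
  · -- left inverse
    intro j hj
    simp only [Finset.mem_filter, Finset.mem_Icc] at hj
    obtain ⟨⟨hj1, hj2⟩, hjd, hjne⟩ := hj
    obtain ⟨c, hc⟩ := hjd
    have hcd : n / j = c := by rw [hc, Int.mul_ediv_cancel_left _ (by omega)]
    have hc1 : 1 ≤ c := by nlinarith
    rw [hcd, hc, mul_comm, Int.mul_ediv_cancel_left _ (by omega)]
  · -- right inverse
    intro j hj
    simp only [Finset.mem_filter, Finset.mem_Icc] at hj
    obtain ⟨⟨hj1, hj2⟩, hjd⟩ := hj
    obtain ⟨c, hc⟩ := hjd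
    have hcd : n / j = c := by rw [hc, Int.mul_ediv_cancel_left _ (by omega)]
    have hc1 : 1 ≤ c := by nlinarith
    rw [hcd, hc, mul_comm, Int.mul_ediv_cancel_left _ (by omega)]
  · -- values
    intro j hj
    rfl

-- characterization of A's is_perfect loop
lemma perfLoop_iff (n : Int) (hn : 2 ≤ n) :
    ∀ a t, 2 ≤ a → 1 ≤ t → t < n →
      (perfLoopA n (PySem.List.pyRange a n 1) t = true ↔
        ∃ K, a ≤ K ∧ K < n ∧ t + dsum n a K = n) := by
  suffices H : ∀ k : ℕ, ∀ a t, 2 ≤ a → 1 ≤ t → t < n → (n - a).toNat ≤ k →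
      (perfLoopA n (PySem.List.pyRange a n 1) t = true ↔
        ∃ K, a ≤ K ∧ K < n ∧ t + dsum n a K = n) by
    intro a t ha ht1 ht2
    exact H (n - a).toNat a t ha ht1 ht2 le_rfl
  intro k
  induction k with
  | zero =>
    intro a t ha ht1 ht2 hk
    rw [PySem.List.pyRange_one_eq_nil (by omega)]
    simp only [perfLoopA]
    constructor
    · intro h; cases h
    · rintro ⟨K, h1, h2, _⟩; omega
  | succ k ih =>
    intro a t ha ht1 ht2 hk
    rcases le_or_gt n a with hna | hna
    · rw [PySem.List.pyRange_one_eq_nil (by omega)]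
      simp only [perfLoopA]
      constructor
      · intro h; cases h
      · rintro ⟨K, h1, h2, _⟩; omega
    · rw [PySem.List.pyRange_one_cons (by omega)]
      by_cases hd : a ∣ n
      · have hmod : (PySem.Int.mod n a == 0) = true := by
          simp [PySem.Int.mod_eq_zero_iff_dvd, hd]
        simp only [perfLoopA, hmod, if_true]
        by_cases hgt : n < t + a
        · rw [if_pos hgt]
          constructor
          · intro h; cases h
          · rintro ⟨K, h1, h2, h3⟩
            have hds : a ≤ dsum n a K := by
              rw [dsum_cons n a K h1, if_pos hd]
              have := dsum_nonneg n (a + 1) K (by omega)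
              omega
            omega
        · rw [if_neg hgt]
          by_cases heq : t + a = n
          · have hbe : (t + a == n) = true := by simp [heq]
            rw [hbe, if_pos rfl]
            constructor
            · intro _
              refine ⟨a, le_rfl, by omega, ?_⟩
              rw [dsum_cons n a a le_rfl, if_pos hd, dsum_nil n (a + 1) a (by omega)]
              omega
            · intro _; rfl
          · have hbe : (t + a == n) = false := by simp [heq]
            rw [hbe]
            simp only [Bool.false_eq_true, if_false]
            rw [ih (a + 1) (t + a) (by omega) (by omega) (by omega) (by omega)]
            constructor
            · rintro ⟨K, h1, h2, h3⟩
              refine ⟨K, by omega, h2, ?_⟩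
              rw [dsum_cons n a K (by omega), if_pos hd]
              omega
            · rintro ⟨K, h1, h2, h3⟩
              rcases eq_or_lt_of_le h1 with heqK | hKa
              · exfalso
                rw [← heqK, dsum_cons n a a le_rfl, if_pos hd,
                  dsum_nil n (a + 1) a (by omega)] at h3
                omega
              · refine ⟨K, by omega, h2, ?_⟩
                rw [dsum_cons n a K (by omega), if_pos hd] at h3
                omega
      · have hmod : (PySem.Int.mod n a == 0) = false := by
          simp [PySem.Int.mod_eq_zero_iff_dvd, hd]
        rw [perfLoopA, hmod]
        simp only [Bool.false_eq_true, if_false]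
        have hbe : (t == n) = false := by simp [show t ≠ n by omega]
        rw [hbe]
        simp only [Bool.false_eq_true, if_false]
        rw [ih (a + 1) t (by omega) ht1 ht2 (by omega)]
        constructor
        · rintro ⟨K, h1, h2, h3⟩
          refine ⟨K, by omega, h2, ?_⟩
          rw [dsum_cons n a K (by omega), if_neg hd]
          omega
        · rintro ⟨K, h1, h2, h3⟩
          rcases eq_or_lt_of_le h1 with heqK | hKa
          · exfalso
            rw [← heqK, dsum_cons n a a le_rfl, if_neg hd,
              dsum_nil n (a + 1) a (by omega)] at h3
            omega
          · refine ⟨K, by omega, h2, ?_⟩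
            rw [dsum_cons n a K (by omega), if_neg hd] at h3
            omega

-- A's primality test agrees with "n ≥ 2 with no divisor in [2, isqrt n]"
lemma primeA_eq (n : Int) (hn : 0 ≤ n) :
    isPrimeA n = (decide (2 ≤ n) && !anyDiv n 2 (isq n)) := by
  unfold isPrimeA
  by_cases h2 : n < 2
  · rw [if_pos h2, show decide (2 ≤ n) = false by simp; omega, Bool.false_and]
  · rw [if_neg h2, show decide (2 ≤ n) = true by simp; omega, Bool.true_and]
    by_cases he2 : n = 2
    · subst he2
      rw [show ((2 : ℤ) == 2) = true from rfl, if_pos rfl]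
      have hisq : isq 2 < 2 := by
        obtain ⟨hb1, _⟩ := isq_bounds 2 (by norm_num)
        have h0 := isq_nonneg 2
        nlinarith
      rw [anyDiv_empty 2 2 (isq 2) (by omega)]
      rfl
    · rw [show (n == 2) = false by simp [he2]]
      simp only [Bool.false_eq_true, if_false]
      by_cases hev : 2 ∣ n
      · rw [show (PySem.Int.mod n 2 == 0) = true by simp [PySem.Int.mod_eq_zero_iff_dvd, hev],
          if_pos rfl]
        have hn4 : 4 ≤ n := by obtain ⟨c, hc⟩ := hev; omega
        have h2r : 2 ≤ isq n := (le_isq_iff n 2 (by omega) (by norm_num)).mp (by omega)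
        rw [(anyDiv_iff n 2 (isq n)).mpr ⟨2, le_rfl, h2r, hev⟩]
        rfl
      · rw [show (PySem.Int.mod n 2 == 0) = false by simp [PySem.Int.mod_eq_zero_iff_dvd, hev]]
        simp only [Bool.false_eq_true, if_false]
        rw [isqrtA_eq n (by omega)]
        cases hAny : anyDiv n 2 (isq n) with
        | false =>
          simp only [Bool.not_false]
          rw [List.all_eq_true]
          intro i hi
          rw [PySem.List.mem_pyRange_iff_of_pos (by norm_num)] at hi
          obtain ⟨h3i, hiu, hstep⟩ := hi
          have hnd : ¬ i ∣ n := by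
            intro hdvd
            have := (anyDiv_iff n 2 (isq n)).mpr ⟨i, by omega, by omega, hdvd⟩
            rw [hAny] at this
            cases this
          simp [PySem.Int.mod_eq_zero_iff_dvd, hnd]
        | true =>
          simp only [Bool.not_true]
          obtain ⟨j, hj2, hjr, hjd⟩ := (anyDiv_iff n 2 (isq n)).mp hAny
          have hjodd : ¬ (2 : ℤ) ∣ j := fun hh => hev (hh.trans hjd)
          refine List.all_eq_false.mpr ⟨j, ?_, ?_⟩
          · rw [PySem.List.mem_pyRange_iff_of_pos (by norm_num)]
            omega
          · simp [PySem.Int.mod_eq_zero_iff_dvd, hjd]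

-- a perfect number's full proper-divisor prefix hits n
lemma perfect_prefix (n : Int) (hn : 2 ≤ n) (h : dsum n 1 n = 2 * n) :
    ∃ K, 2 ≤ K ∧ K < n ∧ 1 + dsum n 2 K = n := by
  rcases eq_or_lt_of_le hn with heq | hn3
  · exfalso
    rw [← heq] at h
    have : dsum 2 1 2 = 3 := by decide
    omega
  · have h1 : dsum n 1 n = 1 + dsum n 2 n := by
      rw [dsum_cons n 1 n (by omega), if_pos (one_dvd n)]
      norm_num
    have ht : dsum n 2 n = dsum n 2 (n - 1) + n := by
      rw [dsum_top n 2 n (by omega), if_pos (dvd_refl n)]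
    exact ⟨n - 1, by omega, by omega, by omega⟩

-- proof-side restatement of the divisor sum over an interval of naturals
def ndsum (m a b : Nat) : Nat := ∑ i ∈ Finset.Icc a b, if i ∣ m then i else 0

lemma ndsum_nil (m a b : Nat) (h : b < a) : ndsum m a b = 0 := by
  unfold ndsum
  rw [Finset.Icc_eq_empty (by omega), Finset.sum_empty]

lemma ndsum_cons (m a b : Nat) (h : a ≤ b) :
    ndsum m a b = (if a ∣ m then a else 0) + ndsum m (a + 1) b := by
  unfold ndsum
  rw [← Finset.insert_Icc_add_one_left_eq_Icc (a := a) (b := b) h, Finset.sum_insert (by simp)]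

-- the Int-level divisor sum of the proofs equals the Nat-level one D_ is stated with
lemma dsum_eq_ndsum (n : Int) (hn : 0 ≤ n) :
    ∀ a b : Int, 0 < a → dsum n a b = (ndsum n.toNat a.toNat b.toNat : Int) := by
  suffices H : ∀ k : ℕ, ∀ a b : Int, 0 < a → (b + 1 - a).toNat ≤ k →
      dsum n a b = (ndsum n.toNat a.toNat b.toNat : Int) by
    intro a b ha
    exact H (b + 1 - a).toNat a b ha le_rfl
  intro k
  induction k with
  | zero =>
    intro a b ha hk
    rw [dsum_nil n a b (by omega), ndsum_nil n.toNat a.toNat b.toNat (by omega)]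
    rfl
  | succ k ih =>
    intro a b ha hk
    rcases le_or_gt a b with hab | hab
    · have hdvd : a ∣ n ↔ a.toNat ∣ n.toNat := by
        constructor
        · intro hdv
          exact Int.natCast_dvd_natCast.mp
            (by rwa [Int.toNat_of_nonneg hn, Int.toNat_of_nonneg ha.le])
        · intro hdv
          have h2 := Int.natCast_dvd_natCast.mpr hdv
          rwa [Int.toNat_of_nonneg hn, Int.toNat_of_nonneg ha.le] at h2
      have hsucc : (a + 1).toNat = a.toNat + 1 := by omega
      rw [dsum_cons n a b hab, ndsum_cons n.toNat a.toNat b.toNat (by omega),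
        ih (a + 1) b (by omega) (by omega), hsucc]
      push_cast
      by_cases hd : a ∣ n
      · rw [if_pos hd, if_pos (hdvd.mp hd)]
        omega
      · rw [if_neg hd, if_neg (fun hh => hd (hdvd.mpr hh))]
    · rw [dsum_nil n a b (by omega), ndsum_nil n.toNat a.toNat b.toNat (by omega)]
      rfl

-- dvList m lists exactly the divisors of m
lemma dvList_mem (m d : Nat) (hm : 0 < m) : d ∈ dvList m ↔ (d ∣ m ∧ 1 ≤ d ∧ d ≤ m) := by
  unfold dvList
  rw [List.mem_dedup, List.mem_flatMap]
  have hb1 := Nat.sqrt_le' m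
  have hb2 := Nat.lt_succ_sqrt' m
  constructor
  · rintro ⟨x, hx, hd⟩
    rw [List.mem_filter] at hx
    obtain ⟨hxmem, hxdvd⟩ := hx
    obtain ⟨y, hy, rfl⟩ := List.mem_map.mp hxmem
    rw [List.mem_range] at hy
    have hdvd' : (y + 1) ∣ m := by simpa using hxdvd
    rcases List.mem_pair.mp hd with rfl | rfl
    · exact ⟨hdvd', by omega, Nat.le_of_dvd hm hdvd'⟩
    · obtain ⟨c, hc⟩ := hdvd'
      have hcd : m / (y + 1) = c := by rw [hc, Nat.mul_div_cancel_left _ (by omega)]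
      have hcdvd : c ∣ m := ⟨y + 1, by rw [hc]; ring⟩
      have hc0 : 0 < c := by
        rcases Nat.eq_zero_or_pos c with rfl | hpos
        · omega
        · exact hpos
      rw [hcd]
      exact ⟨hcdvd, by omega, Nat.le_of_dvd hm hcdvd⟩
  · rintro ⟨hdvd, hd1, hdm⟩
    rcases le_or_gt d (Nat.sqrt m) with hle | hgt
    · refine ⟨d, ?_, List.mem_cons_self⟩
      rw [List.mem_filter]
      refine ⟨List.mem_map.mpr ⟨d - 1, List.mem_range.mpr (by omega), by omega⟩, ?_⟩
      simpa [show d - 1 + 1 = d by omega] using hdvd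
    · obtain ⟨c, hc⟩ := hdvd
      have hc0 : 0 < c := by
        rcases Nat.eq_zero_or_pos c with rfl | hpos
        · omega
        · exact hpos
      have hcs : c ≤ Nat.sqrt m := by
        by_contra hcc
        push_neg at hcc
        have : (Nat.sqrt m + 1) * (Nat.sqrt m + 1) ≤ d * c :=
          Nat.mul_le_mul (by omega) (by omega)
        nlinarith
      have hmc : m / c = d := by rw [hc, mul_comm, Nat.mul_div_cancel_left _ (by omega)]
      refine ⟨c, ?_, ?_⟩
      · rw [List.mem_filter]
        refine ⟨List.mem_map.mpr ⟨c - 1, List.mem_range.mpr (by omega), by omega⟩, ?_⟩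
        simpa [show c - 1 + 1 = c by omega] using (⟨d, by rw [hc]; ring⟩ : c ∣ m)
      · rw [hmc]
        exact List.mem_cons_of_mem _ List.mem_cons_self

-- the prefix sums of dvList agree with the interval divisor sums
lemma lsum_le (m K : Nat) (hm : 0 < m) :
    ((dvList m).filter (fun d => d ≤ K)).sum = ndsum m 1 K := by
  have hnd : ((dvList m).filter (fun d => d ≤ K)).Nodup :=
    (List.nodup_dedup _).filter _
  have h1 : ((dvList m).filter (fun d => d ≤ K)).sum
      = (((dvList m).filter (fun d => d ≤ K)).toFinset).sum id := by
    rw [List.sum_toFinset _ hnd]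
    simp
  rw [h1, List.toFinset_filter]
  unfold ndsum
  rw [← Finset.sum_filter]
  apply Finset.sum_congr _ (fun _ _ => rfl)
  ext d
  rw [Finset.mem_filter, Finset.mem_filter, Finset.mem_Icc, List.mem_toFinset,
    dvList_mem m d hm]
  constructor
  · rintro ⟨⟨hdvd, hd1, _⟩, hdK⟩
    exact ⟨⟨hd1, by simpa using hdK⟩, hdvd⟩
  · rintro ⟨⟨hd1, hdK⟩, hdvd⟩
    exact ⟨⟨hdvd, hd1, Nat.le_of_dvd hm hdvd⟩, by simpa using hdK⟩

lemma lsum_all (m : Nat) (hm : 0 < m) : (dvList m).sum = ndsum m 1 m := by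
  rw [← lsum_le m m hm]
  congr 1
  symm
  apply List.filter_eq_self.mpr
  intro d hd
  have := (dvList_mem m d hm).mp hd
  simpa using this.2.2

-- D_ restated over the Int-level divisor sums of the proofs
lemma D_iff (n : Int) (hn : 0 ≤ n) :
    D_get_fun_fact n ↔
      ((∃ K : Int, 2 ≤ K ∧ K < n ∧ 1 + dsum n 2 K = n) ∧ dsum n 1 n ≠ 2 * n) := by
  unfold D_get_fun_fact
  rcases Nat.eq_zero_or_pos n.toNat with hm0 | hm1
  · constructor
    · rintro ⟨⟨K, _, hKlt, _⟩, _⟩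
      omega
    · rintro ⟨⟨K, hK2, hKn, _⟩, _⟩
      omega
  · have h2 : ((2 : ℤ)).toNat = 2 := rfl
    have hfull : dsum n 1 n = (ndsum n.toNat 1 n.toNat : Int) := by
      rw [dsum_eq_ndsum n hn 1 n (by omega)]
      rfl
    have hcut : ∀ K : Nat, 1 ≤ K → ndsum n.toNat 1 K = 1 + ndsum n.toNat 2 K := by
      intro K hK
      rw [ndsum_cons n.toNat 1 K hK, if_pos (one_dvd _)]
    constructor
    · rintro ⟨⟨K, hKmem, hKlt, hKsum⟩, hne⟩
      obtain ⟨hKdvd, hK1, _⟩ := (dvList_mem n.toNat K hm1).mp hKmem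
      rw [lsum_le n.toNat K hm1] at hKsum
      rw [lsum_all n.toNat hm1] at hne
      have hK2 : 2 ≤ K := by
        rcases Nat.lt_or_ge K 2 with hlt | hge
        · exfalso
          have hKeq : K = 1 := by omega
          rw [hKeq, hcut 1 le_rfl, ndsum_nil n.toNat 2 1 (by omega)] at hKsum
          omega
        · exact hge
      rw [hcut K (by omega)] at hKsum
      refine ⟨⟨(K : Int), by omega, by omega, ?_⟩, by omega⟩
      rw [dsum_eq_ndsum n hn 2 K (by omega), h2, Int.toNat_natCast]
      omega
    · rintro ⟨⟨K, hK2, hKn, hKsum⟩, hne⟩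
      rw [dsum_eq_ndsum n hn 2 K (by omega), h2] at hKsum
      have hKsum' : 1 + ndsum n.toNat 2 K.toNat = n.toNat := by omega
      have hsum_ne : (∑ i ∈ Finset.Icc 2 K.toNat, if i ∣ n.toNat then i else 0) ≠ 0 := by
        unfold ndsum at hKsum'
        omega
      obtain ⟨d0, hd0mem, hd0⟩ := Finset.exists_ne_zero_of_sum_ne_zero hsum_ne
      rw [Finset.mem_Icc] at hd0mem
      have hd0dvd : d0 ∣ n.toNat := by
        by_contra hh
        rw [if_neg hh] at hd0
        exact hd0 rfl
      have hFne : (((dvList n.toNat).toFinset).filter (fun d => 2 ≤ d ∧ d ≤ K.toNat)).Nonempty :=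
        ⟨d0, Finset.mem_filter.mpr
          ⟨List.mem_toFinset.mpr ((dvList_mem n.toNat d0 hm1).mpr
            ⟨hd0dvd, by omega, Nat.le_of_dvd hm1 hd0dvd⟩), hd0mem.1, hd0mem.2⟩⟩
      set K' := (((dvList n.toNat).toFinset).filter (fun d => 2 ≤ d ∧ d ≤ K.toNat)).max' hFne
        with hK'def
      have hK'F := Finset.max'_mem _ hFne
      rw [Finset.mem_filter, List.mem_toFinset] at hK'F
      have hsame : ndsum n.toNat 2 K' = ndsum n.toNat 2 K.toNat := by
        unfold ndsum
        rw [← Finset.sum_filter, ← Finset.sum_filter]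
        apply Finset.sum_congr _ (fun _ _ => rfl)
        ext d
        rw [Finset.mem_filter, Finset.mem_filter, Finset.mem_Icc, Finset.mem_Icc]
        constructor
        · rintro ⟨⟨hda, hdb⟩, hdvd⟩
          exact ⟨⟨hda, by omega⟩, hdvd⟩
        · rintro ⟨⟨hda, hdb⟩, hdvd⟩
          refine ⟨⟨hda, ?_⟩, hdvd⟩
          exact Finset.le_max' _ d (Finset.mem_filter.mpr
            ⟨List.mem_toFinset.mpr ((dvList_mem n.toNat d hm1).mpr
              ⟨hdvd, by omega, Nat.le_of_dvd hm1 hdvd⟩), hda, hdb⟩)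
      refine ⟨⟨K', hK'F.1, by omega, ?_⟩, ?_⟩
      · rw [lsum_le n.toNat K' hm1, hcut K' (by omega), hsame]
        omega
      · rw [lsum_all n.toNat hm1]
        omega

-- the two Armstrong conditions coincide
lemma armstrong_eq (n : Int) :
    isArmstrongA n =
      (n == ((PySem.Int.toStr n).toList.map
        (fun c => ((PySem.Int.ofChars? [c]).getD 0) ^ (PySem.Str.len (PySem.Int.toStr n)).toNat)).sum) := by
  simp only [isArmstrongA, digitsA, List.map_map, List.length_map]
  rw [show (PySem.Str.len (PySem.Int.toStr n)).toNat = (PySem.Int.toChars n).length by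
    rw [PySem.Str.len_eq, PySem.Int.toList_toStr, Int.toNat_natCast]]
  rw [PySem.Int.toList_toStr]
  rfl

-- A = B on Pre_ outside D_
lemma main_eq (n : Int) (hn : 0 ≤ n) (hnd : ¬ D_get_fun_fact n) :
    get_fun_fact n = get_fun_fact_alt n := by
  rcases le_or_gt 2 n with h2 | hlt2
  case inr =>
    have h01 : n = 0 ∨ n = 1 := by omega
    rcases h01 with rfl | rfl <;> decide
  case inl =>
    have h0 := isq_nonneg n
    obtain ⟨hb1, hb2⟩ := isq_bounds n hn
    have hisqn : isq n ≤ n := by nlinarith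
    have hloop := altLoop_spec n hn (n.toNat + 1) 1 0 false le_rfl (by omega)
    rw [show max (1:ℤ) 2 = 2 from by norm_num] at hloop
    have hl1 : (altLoopF n (n.toNat + 1) 1 0 false).1 = dsum n 1 n := by
      rw [hloop]
      simpa using pairing n (by omega)
    have hl2 : (altLoopF n (n.toNat + 1) 1 0 false).2 = anyDiv n 2 (isq n) := by
      rw [hloop]
      rfl
    simp only [get_fun_fact, get_fun_fact_alt]
    rw [hl1, hl2, primeA_eq n hn]
    cases hP : (decide (2 ≤ n) && !anyDiv n 2 (isq n)) with
    | true => simp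
    | false =>
      simp only [Bool.false_eq_true, if_false]
      have hperf : isPerfectA n = (dsum n 1 n == 2 * n) := by
        unfold isPerfectA
        rw [if_neg (by omega : ¬ n < 2)]
        cases hds : (dsum n 1 n == 2 * n) with
        | true =>
          have hds' : dsum n 1 n = 2 * n := by simpa using hds
          exact ((perfLoop_iff n h2) 2 1 le_rfl le_rfl (by omega)).mpr
            (perfect_prefix n h2 hds')
        | false =>
          have hds' : dsum n 1 n ≠ 2 * n := by simpa using hds
          cases hPL : perfLoopA n (PySem.List.pyRange 2 n 1) 1 with
          | false => rfl
          | true =>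
            exfalso
            obtain ⟨K, k1, k2, k3⟩ :=
              ((perfLoop_iff n h2) 2 1 le_rfl le_rfl (by omega)).mp hPL
            exact hnd ((D_iff n hn).mpr ⟨⟨K, k1, k2, k3⟩, hds'⟩)
      rw [hperf, show decide (2 ≤ n) = true from by simp [h2], Bool.true_and]
      cases hQ : (dsum n 1 n == 2 * n) with
      | true => simp
      | false =>
        simp only [Bool.false_eq_true, if_false]
        rw [armstrong_eq n]

-- ===== VERDICT (by name: the statement is the Claim_ definition above) =====
theorem get_fun_fact_spec : Claim_unchanged_get_fun_fact := by
  intro n _ hpre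
  intro hnd
  exact main_eq n hpre hnd

theorem get_fun_fact_changed : Claim_changed_get_fun_fact := by
  unfold Claim_changed_get_fun_fact
  refine ⟨by decide, by decide, ?_, by decide, by decide, by decide⟩
  have hs : Nat.sqrt 24 = 4 := by
    have h1 : 4 ≤ Nat.sqrt 24 := Nat.le_sqrt.mpr (by norm_num)
    have h2 : ¬ 5 ≤ Nat.sqrt 24 := fun h => by have := Nat.le_sqrt.mp h; omega
    omega
  unfold D_get_fun_fact dvList
  rw [show (pvDiffWitness_get_fun_fact).toNat = 24 from rfl, hs]
  decide

theorem get_fun_fact_tight : Claim_exact_get_fun_fact := by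
  intro n _ hpre hD
  have hn : (0:ℤ) ≤ n := hpre
  obtain ⟨⟨K, hK2, hKn, hKs⟩, hds⟩ := (D_iff n hn).mp hD
  have hn3 : 3 ≤ n := by omega
  have h0 := isq_nonneg n
  obtain ⟨hb1, hb2⟩ := isq_bounds n hn
  have hisqn : isq n ≤ n := by nlinarith
  have hdpos : 0 < dsum n 2 K := by omega
  obtain ⟨j, hj2, hjK, hjd⟩ := dsum_pos_div n 2 K (by omega) hdpos
  have hsmall : ∃ d, 2 ≤ d ∧ d ≤ isq n ∧ d ∣ n := by
    rcases le_or_gt j (isq n) with hle | hgt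
    · exact ⟨j, hj2, hle, hjd⟩
    · obtain ⟨c, hc⟩ := hjd
      have hc1 : 1 ≤ c := by nlinarith
      have hcd : c ∣ n := ⟨j, by rw [hc]; ring⟩
      have hcne : c ≠ 1 := by
        intro h1
        rw [h1, mul_one] at hc
        omega
      have hcr : c ≤ isq n := by
        by_contra hlt
        push_neg at hlt
        have h1 : (isq n + 1) * (isq n + 1) ≤ j * c :=
          mul_le_mul (by omega) (by omega) (by omega) (by omega)
        nlinarith
      exact ⟨c, by omega, hcr, hcd⟩
  obtain ⟨d, hd2, hdr, hdd⟩ := hsmall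
  have hAny : anyDiv n 2 (isq n) = true := (anyDiv_iff _ _ _).mpr ⟨d, hd2, hdr, hdd⟩
  have hPf : (decide (2 ≤ n) && !anyDiv n 2 (isq n)) = false := by
    rw [hAny]
    simp
  have hPerfA : isPerfectA n = true := by
    unfold isPerfectA
    rw [if_neg (by omega : ¬ n < 2)]
    exact ((perfLoop_iff n (by omega)) 2 1 le_rfl le_rfl (by omega)).mpr ⟨K, hK2, hKn, hKs⟩
  have hloop := altLoop_spec n hn (n.toNat + 1) 1 0 false le_rfl (by omega)
  rw [show max (1:ℤ) 2 = 2 from by norm_num] at hloop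
  have hl1 : (altLoopF n (n.toNat + 1) 1 0 false).1 = dsum n 1 n := by
    rw [hloop]
    simpa using pairing n (by omega)
  have hl2 : (altLoopF n (n.toNat + 1) 1 0 false).2 = anyDiv n 2 (isq n) := by
    rw [hloop]
    rfl
  simp only [get_fun_fact, get_fun_fact_alt]
  rw [hl1, hl2, primeA_eq n hn, hPf, hPerfA, armstrong_eq n]
  rw [show (dsum n 1 n == 2 * n) = false from by simp [hds], Bool.and_false]
  simp only [Bool.false_eq_true, if_false, if_true]
  cases hArm : (n == ((PySem.Int.toStr n).toList.map
      (fun c => ((PySem.Int.ofChars? [c]).getD 0) ^ (PySem.Str.len (PySem.Int.toStr n)).toNat)).sum) with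
  | false =>
    simp only [Bool.false_eq_true, if_false]
    intro h
    have h' := congrArg String.toList h
    simp only [String.toList_append] at h'
    have h'' := List.append_cancel_left h'
    exact absurd h'' (by decide)
  | true =>
    simp only [if_true]
    intro h
    have h' := congrArg String.toList h
    simp only [String.toList_append, List.append_assoc] at h'
    have h'' := List.append_cancel_left h'
    have h3 := congrArg (List.take 7) h''
    rw [List.take_append_of_le_length (by decide)] at h3
    exact absurd h3 (by decide)
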